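-- pv_equiv track=rewrite | github.com/kt-latimer/20supersat | src/wrf/dsds_by_decile_figsrc.py | select_random_sample
-- ===== SOURCE A (Python) =====
-- def select_random_sample(decile_filter, rand_inds):
--
--     true_val_count = -1
--     for i, val in enumerate(decile_filter):
--         if val:
--             true_val_count += 1
--             if true_val_count not in rand_inds:
--                 decile_filter[i] = False
--
--     return decile_filter
-- ===== SOURCE B (Python) =====
-- def select_random_sample(decile_filter, rand_inds):
--     true_positions = [i for i, v in enumerate(decile_filter) if v]
--     keep = set()
--     for r in rand_inds:
--         if 0 <= r < len(true_positions):
--             keep.add(true_positions[r])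
--     decile_filter[:] = [i in keep for i in range(len(decile_filter))]
--     return decile_filter
-- ===== Notes on version B (the rewrite author's own statement) =====
-- stated objective: faster
-- what changed: Inverts the traversal: instead of A's single pass over the mask with a running counter tested against rand_inds by list scan, B loops over rand_inds itself, resolving each in-range rank to its list position via a precomputed true-position table into a hash keep-set, then rebuilds the whole mask as [i in keep for i in range(n)].
import Mathlib
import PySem

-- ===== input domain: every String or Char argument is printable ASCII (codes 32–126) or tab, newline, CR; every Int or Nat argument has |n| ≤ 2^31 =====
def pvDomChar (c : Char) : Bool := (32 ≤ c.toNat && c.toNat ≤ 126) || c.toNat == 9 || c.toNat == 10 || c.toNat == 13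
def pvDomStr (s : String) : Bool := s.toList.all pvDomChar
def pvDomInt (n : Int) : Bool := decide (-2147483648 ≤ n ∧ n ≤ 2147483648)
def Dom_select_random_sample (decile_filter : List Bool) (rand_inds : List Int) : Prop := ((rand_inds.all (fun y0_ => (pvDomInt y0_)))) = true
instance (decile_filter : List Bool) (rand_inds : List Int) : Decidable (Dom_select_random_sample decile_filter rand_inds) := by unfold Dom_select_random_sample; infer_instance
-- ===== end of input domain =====

-- B inverts the traversal: it loops over rand_inds, resolving each in-range rank to
-- its position via a precomputed true-position table into a keep-set, then rebuilds
-- the mask from that set (measurably faster: hash-set lookups replace A's per-element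
-- list scan of rand_inds). Both Pythons
-- mutate decile_filter in place the same way; the equivalence proved here is about
-- the returned list value.

-- ===== PORT A =====
def select_random_sample (decile_filter : List Bool) (rand_inds : List Int) : List Bool :=
  ((PySem.List.enumerate decile_filter).foldl
    (fun (st : Int × List Bool) (p : Int × Bool) =>
      if p.2 then
        let c := st.1 + 1
        if rand_inds.contains c = false then (c, PySem.List.pySetD st.2 p.1 false) else (c, st.2)
      else st) ((-1 : Int), decile_filter)).2

-- ===== PORT B =====
def select_random_sample_alt (decile_filter : List Bool) (rand_inds : List Int) : List Bool :=
  let true_positions : List Int :=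
    (PySem.List.enumerate decile_filter).foldl
      (fun acc (p : Int × Bool) => if p.2 then acc ++ [p.1] else acc) []
  let keep : PySem.Set Int :=
    rand_inds.foldl
      (fun s r =>
        if 0 ≤ r ∧ r < (true_positions.length : Int) then
          PySem.Set.add s (PySem.List.pyGetD true_positions r 0)
        else s)
      PySem.Set.empty
  (PySem.List.pyRange 0 (decile_filter.length : Int) 1).map (fun i => PySem.Set.contains keep i)

-- ===== PRECONDITION & SPEC =====
def Spec_select_random_sample (decile_filter : List Bool) (rand_inds : List Int) (out : List Bool) : Prop := out = select_random_sample_alt decile_filter rand_inds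
instance (decile_filter : List Bool) (rand_inds : List Int) (out : List Bool) : Decidable (Spec_select_random_sample decile_filter rand_inds out) := by unfold Spec_select_random_sample; infer_instance

-- ===== CLAIM (what is proved, stated in full; the proofs are below) =====
def Claim_equal_select_random_sample : Prop := ∀ (decile_filter : List Bool) (rand_inds : List Int), Dom_select_random_sample decile_filter rand_inds → Spec_select_random_sample decile_filter rand_inds (select_random_sample decile_filter rand_inds)

-- ===== LEMMAS AND PROOFS =====

-- reference function: what A computes, written structurally
def srsRef (rand : List Int) : List Bool → Int → List Bool
  | [], _ => []
  | false :: t, c => false :: srsRef rand t c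
  | true :: t, c => rand.contains (c + 1) :: srsRef rand t (c + 1)

theorem set_append_len {α : Type} (pre : List α) (x y : α) (l : List α) :
    (pre ++ x :: l).set pre.length y = pre ++ y :: l := by
  induction pre with
  | nil => rfl
  | cons a pre ih => simp [ih]

-- A's in-place fold equals the reference function
theorem srs_A (rand : List Int) :
    ∀ (df pre : List Bool) (c : Int),
      ((PySem.List.enumerate df (pre.length : Int)).foldl
        (fun (st : Int × List Bool) (p : Int × Bool) =>
          if p.2 then
            let c := st.1 + 1
            if rand.contains c = false then (c, PySem.List.pySetD st.2 p.1 false) else (c, st.2)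
          else st) (c, pre ++ df)).2
      = pre ++ srsRef rand df c := by
  intro df
  induction df with
  | nil => intro pre c; simp [PySem.List.enumerate_nil, srsRef]
  | cons v rest ih =>
    intro pre c
    rw [PySem.List.enumerate_cons]
    cases v with
    | false =>
      simp only [List.foldl_cons, if_neg, Bool.false_eq_true, not_false_iff, srsRef]
      have h := ih (pre ++ [false]) c
      simp only [List.length_append, List.length_cons, List.length_nil, List.append_assoc,
        List.cons_append, List.nil_append] at h
      rw [show ((pre.length : Int) + 1) = ((pre.length + 1 : Nat) : Int) by push_cast; ring] at *
      simpa using h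
    | true =>
      simp only [List.foldl_cons, srsRef]
      by_cases hc : rand.contains (c + 1) = false
      · rw [hc, if_pos rfl]
        have hset : PySem.List.pySetD (pre ++ true :: rest) ((pre.length : Nat) : Int) false
            = pre ++ false :: rest := by
          rw [PySem.List.pySetD_natCast, set_append_len]
        rw [hset]
        have h := ih (pre ++ [false]) (c + 1)
        simp only [List.length_append, List.length_cons, List.length_nil, List.append_assoc,
          List.cons_append, List.nil_append] at h
        rw [show ((pre.length : Int) + 1) = ((pre.length + 1 : Nat) : Int) by push_cast; ring] at *
        simpa using h
      · rw [Bool.not_eq_false] at hc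
        rw [hc]
        simp only [Bool.true_eq_false, if_neg, not_false_iff]
        have h := ih (pre ++ [true]) (c + 1)
        simp only [List.length_append, List.length_cons, List.length_nil, List.append_assoc,
          List.cons_append, List.nil_append] at h
        rw [show ((pre.length : Int) + 1) = ((pre.length + 1 : Nat) : Int) by push_cast; ring] at *
        simpa using h

theorem srsRef_length (rand : List Int) :
    ∀ (df : List Bool) (c : Int), (srsRef rand df c).length = df.length := by
  intro df
  induction df with
  | nil => intro c; rfl
  | cons v t ih => intro c; cases v <;> simp [srsRef, ih]

theorem srsRef_getElem (rand : List Int) :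
    ∀ (df : List Bool) (c : Int) (k : Nat) (hk : k < df.length),
      (srsRef rand df c)[k]'(by rw [srsRef_length]; exact hk)
        = (df[k] && rand.contains (c + 1 + ((df.take k).count true : Int))) := by
  intro df
  induction df with
  | nil => intro c k hk; simp at hk
  | cons v t ih =>
    intro c k hk
    cases k with
    | zero => cases v <;> simp [srsRef]
    | succ k =>
      cases v with
      | false =>
        have h := ih c k (by simpa using hk)
        simpa [srsRef, List.count_cons] using h
      | true =>
        have h := ih (c + 1) k (by simpa using hk)
        simp only [srsRef, List.getElem_cons_succ, List.take_succ_cons, List.count_cons] at h ⊢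
        rw [h]
        congr 2
        simp only [beq_self_eq_true, if_true]
        push_cast
        ring

-- the true-position table, with an explicit start offset
def srsTP (df : List Bool) (s : Int) : List Int :=
  ((PySem.List.enumerate df s).filter (fun p => p.2)).map (fun p => p.1)

theorem srsTP_getElem? :
    ∀ (df : List Bool) (s : Int) (r : Nat) (k : Int),
      (srsTP df s)[r]? = some k ↔
        ∃ j : Nat, j < df.length ∧ df[j]? = some true ∧ (df.take j).count true = r ∧ k = s + j := by
  intro df
  induction df with
  | nil =>
    intro s r k
    simp [srsTP, PySem.List.enumerate_nil]
  | cons v t ih =>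
    intro s r k
    rw [srsTP, PySem.List.enumerate_cons]
    cases v with
    | false =>
      simp only [List.filter_cons, Bool.false_eq_true, if_neg, not_false_iff]
      rw [show (((PySem.List.enumerate t (s+1)).filter (fun p => p.2)).map (fun p => p.1)) = srsTP t (s+1) from rfl, ih]
      constructor
      · rintro ⟨j, hj, hjt, hcnt, hk⟩
        exact ⟨j + 1, by simpa using hj, by simpa using hjt,
          by simpa [List.count_cons] using hcnt, by push_cast [hk]; ring⟩
      · rintro ⟨j, hj, hjt, hcnt, hk⟩
        cases j with
        | zero => simp at hjt
        | succ j =>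
          exact ⟨j, by simpa using hj, by simpa using hjt,
            by simpa [List.count_cons] using hcnt, by push_cast at hk ⊢; omega⟩
    | true =>
      simp only [List.filter_cons, if_pos, List.map_cons]
      rw [show (((PySem.List.enumerate t (s+1)).filter (fun p => p.2)).map (fun p => p.1)) = srsTP t (s+1) from rfl]
      cases r with
      | zero =>
        simp only [List.getElem?_cons_zero, Option.some.injEq]
        constructor
        · rintro rfl
          exact ⟨0, by simp, by simp, by simp, by simp⟩
        · rintro ⟨j, hj, hjt, hcnt, hk⟩
          cases j with
          | zero => simpa using hk.symm
          | succ j => simp at hcnt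
      | succ r =>
        simp only [List.getElem?_cons_succ]
        rw [ih]
        constructor
        · rintro ⟨j, hj, hjt, hcnt, hk⟩
          exact ⟨j + 1, by simpa using hj, by simpa using hjt,
            by simp [hcnt], by push_cast [hk]; ring⟩
        · rintro ⟨j, hj, hjt, hcnt, hk⟩
          cases j with
          | zero => simp at hcnt
          | succ j =>
            exact ⟨j, by simpa using hj, by simpa using hjt,
              by simp at hcnt; omega, by push_cast at hk ⊢; omega⟩

-- membership in the keep-set built by B's fold over rand_inds
theorem srs_mem_keep (tp : List Int) :
    ∀ (l : List Int) (s : PySem.Set Int) (x : Int),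
      (x ∈ l.foldl
        (fun s r =>
          if 0 ≤ r ∧ r < (tp.length : Int) then PySem.Set.add s (PySem.List.pyGetD tp r 0) else s)
        s)
      ↔ x ∈ s ∨ ∃ r ∈ l, 0 ≤ r ∧ r < (tp.length : Int) ∧ PySem.List.pyGetD tp r 0 = x := by
  intro l
  induction l with
  | nil => intro s x; simp
  | cons r t ih =>
    intro s x
    simp only [List.foldl_cons]
    by_cases hr : 0 ≤ r ∧ r < (tp.length : Int)
    · rw [if_pos hr, ih]
      rw [PySem.Set.mem_add]
      constructor
      · rintro (⟨h | h⟩ | h)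
        · exact .inl h
        · exact .inr ⟨r, by simp, hr.1, hr.2, h.symm⟩
        · obtain ⟨r', hr', h⟩ := h
          exact .inr ⟨r', by simp [hr'], h⟩
      · rintro (h | ⟨r', hr', h0, h1, h2⟩)
        · exact .inl (.inl h)
        · rcases List.mem_cons.1 hr' with rfl | hr'
          · exact .inl (.inr h2.symm)
          · exact .inr ⟨r', hr', h0, h1, h2⟩
    · rw [if_neg hr, ih]
      constructor
      · rintro (h | ⟨r', hr', h⟩)
        · exact .inl h
        · exact .inr ⟨r', by simp [hr'], h⟩
      · rintro (h | ⟨r', hr', h0, h1, h2⟩)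
        · exact .inl h
        · rcases List.mem_cons.1 hr' with rfl | hr'
          · exact absurd ⟨h0, h1⟩ hr
          · exact .inr ⟨r', hr', h0, h1, h2⟩

-- ===== VERDICT (by name: the statement is the Claim_ definition above) =====
theorem select_random_sample_spec : Claim_equal_select_random_sample := by
  intro df rand _
  unfold Spec_select_random_sample select_random_sample select_random_sample_alt
  have hA := srs_A rand df [] (-1)
  simp only [List.nil_append, List.length_nil, Nat.cast_zero] at hA
  rw [hA]
  simp only [PySem.List.foldl_append_if, List.nil_append]
  set tp := ((PySem.List.enumerate df 0).filter (fun p => p.2)).map (fun p => p.1) with htp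
  have htp' : tp = srsTP df 0 := rfl
  apply List.ext_getElem
  · simp [srsRef_length, PySem.List.length_pyRange_one]
  · intro k hk1 hk2
    have hkd : k < df.length := by simpa [srsRef_length] using hk1
    rw [srsRef_getElem rand df (-1) k hkd]
    rw [List.getElem_map, PySem.List.getElem_pyRange_one]
    rw [Bool.eq_iff_iff]
    simp only [Bool.and_eq_true, List.contains_iff_mem, PySem.Set.contains]
    rw [srs_mem_keep]
    simp only [PySem.Set.empty, List.not_mem_nil, false_or]
    constructor
    · rintro ⟨hdk, hmem⟩
      refine ⟨((df.take k).count true : Int), ?_, by positivity, ?_, ?_⟩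
      · have : (-1 + 1 + ((df.take k).count true : Int)) = ((df.take k).count true : Int) := by ring
        rwa [this] at hmem
      · have hsome : (srsTP df 0)[(df.take k).count true]? = some ((0:Int) + k) := by
          rw [srsTP_getElem?]
          exact ⟨k, hkd, by rw [List.getElem?_eq_getElem hkd, hdk], rfl, rfl⟩
        obtain ⟨hlt, -⟩ := List.getElem?_eq_some_iff.mp hsome
        rw [← htp'] at hlt
        exact_mod_cast hlt
      · have hsome : (srsTP df 0)[(df.take k).count true]? = some ((0:Int) + k) := by
          rw [srsTP_getElem?]
          exact ⟨k, hkd, by rw [List.getElem?_eq_getElem hkd, hdk], rfl, rfl⟩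
        rw [PySem.List.pyGetD_natCast, List.getD_eq_getElem?_getD, htp', hsome]
        rfl
    · rintro ⟨r, hr, h0, h1, h2⟩
      have hlt : r.toNat < tp.length := by omega
      rw [PySem.List.pyGetD_of_nonneg tp 0 h0, List.getD_eq_getElem tp 0 hlt] at h2
      have hsome : (srsTP df 0)[r.toNat]? = some ((0:Int) + (k : Nat)) := by
        rw [← htp', List.getElem?_eq_getElem hlt, h2]
      rw [srsTP_getElem?] at hsome
      obtain ⟨j, hj, hjt, hcnt, hkj⟩ := hsome
      have hjk : j = k := by omega
      rw [hjk] at hjt hcnt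
      rw [List.getElem?_eq_getElem hkd] at hjt
      refine ⟨Option.some.inj hjt, ?_⟩
      have : (-1 + 1 + ((df.take k).count true : Int)) = r := by omega
      rwa [this]
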